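-- pv_equiv track=rewrite | github.com/daniel-reich/turbo-robot | 2iQhC3t4SDZ6LGMWw_3.py | on_rectangle_bounds
-- ===== SOURCE A (Python) =====
-- def on_rectangle_bounds(points):
--   trans_points = list(zip(*points))
--   max_x, min_x = max(trans_points[0]), min(trans_points[0])
--   max_y, min_y = max(trans_points[1]), min(trans_points[1])
--   for i in points:
--     if max_x == i[0] or min_x == i[0] or max_y == i[1] or min_y == i[1]: continue
--     else: return False
--   return True
-- ===== SOURCE B (Python) =====
-- def on_rectangle_bounds(points):
--   def interior(p):
--     x, y = p
--     return (any(qx < x for qx, _ in points)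
--         and any(qx > x for qx, _ in points)
--         and any(qy < y for _, qy in points)
--         and any(qy > y for _, qy in points))
--   return not any(interior(p) for p in points)
-- ===== Notes on version B (the rewrite author's own statement) =====
-- stated objective: alternative
-- what changed: B never computes the bounding box: instead of min/max extremes it tests each point for being strictly interior (some point strictly left, right, below and above it) with existential scans, returning True iff no point is interior.
import Mathlib
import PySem

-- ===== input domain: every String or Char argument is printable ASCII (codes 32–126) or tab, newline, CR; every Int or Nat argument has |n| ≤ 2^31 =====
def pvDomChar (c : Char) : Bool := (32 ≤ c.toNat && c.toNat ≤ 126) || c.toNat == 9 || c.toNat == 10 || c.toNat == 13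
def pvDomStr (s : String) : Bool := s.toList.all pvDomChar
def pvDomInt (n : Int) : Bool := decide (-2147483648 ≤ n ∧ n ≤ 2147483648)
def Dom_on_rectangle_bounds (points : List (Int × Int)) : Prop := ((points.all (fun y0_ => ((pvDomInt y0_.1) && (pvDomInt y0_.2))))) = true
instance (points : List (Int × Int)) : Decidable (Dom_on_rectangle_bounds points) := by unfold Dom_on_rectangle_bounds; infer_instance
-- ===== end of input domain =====

-- B drops the bounding box entirely: it judges each point "strictly interior" by
-- existential scans (some point strictly left/right/below/above) and returns True
-- iff no point is interior (objective: alternative).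


-- ===== PORT A =====
-- zip(*points) = [xs, ys]; max()/min() via PySem.List.max?/min? (none = empty input, outside Pre_)
def on_rectangle_bounds (points : List (Int × Int)) : Bool :=
  let xs := points.map Prod.fst
  let ys := points.map Prod.snd
  match PySem.List.max? xs (fun v => v), PySem.List.min? xs (fun v => v),
        PySem.List.max? ys (fun v => v), PySem.List.min? ys (fun v => v) with
  | some maxX, some minX, some maxY, some minY =>
      -- the for-loop with early `return False` / final `return True`
      points.all (fun i => maxX == i.1 || minX == i.1 || maxY == i.2 || minY == i.2)
  | _, _, _, _ => false   -- points = []: A raises IndexError here (outside Pre_)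

-- ===== PORT B =====
def pvInterior (points : List (Int × Int)) (p : Int × Int) : Bool :=
  points.any (fun q => q.1 < p.1) && points.any (fun q => q.1 > p.1) &&
  points.any (fun q => q.2 < p.2) && points.any (fun q => q.2 > p.2)

def on_rectangle_bounds_alt (points : List (Int × Int)) : Bool :=
  !(points.any (fun p => pvInterior points p))

-- ===== PRECONDITION & SPEC =====
-- A raises IndexError on empty points (trans_points[0]); excluded by Pre_.
def Pre_on_rectangle_bounds (points : List (Int × Int)) : Prop := points ≠ []
instance (points : List (Int × Int)) : Decidable (Pre_on_rectangle_bounds points) := by unfold Pre_on_rectangle_bounds; infer_instance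
def pvWitness_on_rectangle_bounds : (List (Int × Int)) := [(0, 0), (1, 2)]

def Spec_on_rectangle_bounds (points : List (Int × Int)) (out : Bool) : Prop := out = on_rectangle_bounds_alt points
instance (points : List (Int × Int)) (out : Bool) : Decidable (Spec_on_rectangle_bounds points out) := by unfold Spec_on_rectangle_bounds; infer_instance

-- ===== CLAIM =====
def Claim_equal_on_rectangle_bounds : Prop := ∀ (points : List (Int × Int)), Dom_on_rectangle_bounds points → Pre_on_rectangle_bounds points → Spec_on_rectangle_bounds points (on_rectangle_bounds points)

-- ===== LEMMAS AND PROOFS =====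

-- A coordinate equals the minimum of its column iff no point lies strictly below it (and dually).
theorem eq_min_iff (pts : List (Int × Int)) (m : Int) (f : Int × Int → Int)
    (hm : PySem.List.min? (pts.map f) (fun v => v) = some m) (p : Int × Int) (hp : p ∈ pts) :
    (m = f p ↔ ¬ ∃ q ∈ pts, f q < f p) := by
  have hmin := PySem.List.min?_isMin hm
  have hmem := PySem.List.min?_mem hm
  rw [List.mem_map] at hmem
  obtain ⟨r, hr, hrm⟩ := hmem
  constructor
  · rintro h ⟨q, hq, hlt⟩
    have := hmin (f q) (List.mem_map_of_mem hq)
    simp only at this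
    linarith
  · intro h
    have h1 : m ≤ f p := hmin (f p) (List.mem_map_of_mem hp)
    by_contra hne
    exact h ⟨r, hr, by rw [hrm]; exact lt_of_le_of_ne h1 hne⟩

theorem eq_max_iff (pts : List (Int × Int)) (m : Int) (f : Int × Int → Int)
    (hm : PySem.List.max? (pts.map f) (fun v => v) = some m) (p : Int × Int) (hp : p ∈ pts) :
    (m = f p ↔ ¬ ∃ q ∈ pts, f p < f q) := by
  have hmax := PySem.List.max?_isMax hm
  have hmem := PySem.List.max?_mem hm
  rw [List.mem_map] at hmem
  obtain ⟨r, hr, hrm⟩ := hmem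
  constructor
  · rintro h ⟨q, hq, hlt⟩
    have := hmax (f q) (List.mem_map_of_mem hq)
    simp only at this
    linarith
  · intro h
    have h1 : f p ≤ m := hmax (f p) (List.mem_map_of_mem hp)
    by_contra hne
    exact h ⟨r, hr, by rw [hrm]; exact lt_of_le_of_ne h1 (fun e => hne e.symm)⟩

theorem key_all_eq (pts : List (Int × Int)) (mx mn my mny : Int)
    (hmx : PySem.List.max? (pts.map Prod.fst) (fun v => v) = some mx)
    (hmn : PySem.List.min? (pts.map Prod.fst) (fun v => v) = some mn)
    (hmy : PySem.List.max? (pts.map Prod.snd) (fun v => v) = some my)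
    (hmny : PySem.List.min? (pts.map Prod.snd) (fun v => v) = some mny) :
    pts.all (fun i => mx == i.1 || mn == i.1 || my == i.2 || mny == i.2)
      = !(pts.any (fun p => pvInterior pts p)) := by
  rw [Bool.eq_iff_iff]
  simp only [List.all_eq_true, Bool.not_eq_true', Bool.eq_false_iff, ne_eq, pvInterior,
    Bool.and_eq_true, Bool.or_eq_true, beq_iff_eq, List.any_eq_true, decide_eq_true_eq]
  constructor
  · rintro h ⟨p, hp, ⟨⟨hA, hB⟩, hC⟩, hD⟩
    rcases h p hp with ((h1 | h1) | h1) | h1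
    · exact (eq_max_iff pts mx Prod.fst hmx p hp).mp h1 hB
    · exact (eq_min_iff pts mn Prod.fst hmn p hp).mp h1 hA
    · exact (eq_max_iff pts my Prod.snd hmy p hp).mp h1 hD
    · exact (eq_min_iff pts mny Prod.snd hmny p hp).mp h1 hC
  · intro h i hi
    by_contra hc
    push_neg at hc
    obtain ⟨⟨⟨n1, n2⟩, n3⟩, n4⟩ := hc
    exact h ⟨i, hi, ⟨⟨by
        by_contra hA
        exact n2 ((eq_min_iff pts mn Prod.fst hmn i hi).mpr hA), by
        by_contra hB
        exact n1 ((eq_max_iff pts mx Prod.fst hmx i hi).mpr hB)⟩, by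
        by_contra hC
        exact n4 ((eq_min_iff pts mny Prod.snd hmny i hi).mpr hC)⟩, by
        by_contra hD
        exact n3 ((eq_max_iff pts my Prod.snd hmy i hi).mpr hD)⟩

-- ===== VERDICT =====
theorem on_rectangle_bounds_spec : Claim_equal_on_rectangle_bounds := by
  intro points _ hpre
  unfold Spec_on_rectangle_bounds on_rectangle_bounds on_rectangle_bounds_alt
  obtain ⟨p0, t, rfl⟩ := List.exists_cons_of_ne_nil hpre
  simp only [List.map_cons, PySem.List.max?_id_cons, PySem.List.min?_id_cons]
  exact key_all_eq (p0 :: t) _ _ _ _ (by simp [PySem.List.max?_id_cons])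
    (by simp [PySem.List.min?_id_cons]) (by simp [PySem.List.max?_id_cons])
    (by simp [PySem.List.min?_id_cons])
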